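-- pv_equiv track=rewrite | github.com/memoryonrepeat/algo | misc/clqz/1.py | solution
-- ===== SOURCE A (Python) =====
-- def solution(A):
--     # write your code in Python 3.6
--     count = next = 0
--     visited = {}
--     while(next<len(A) and next>=0):
--         count += 1
--         next += A[next]
--         if next in visited:
--             return -1
--         visited[next] = True
--     return count
-- ===== SOURCE B (Python) =====
-- def solution(A):
--     n = len(A)
--     count = 0
--     pos = 0
--     while 0 <= pos < n:
--         count += 1
--         pos += A[pos]
--         if count > n:
--             return -1
--     return count
-- ===== Notes on version B (the rewrite author's own statement) =====
-- stated objective: simpler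
-- what changed: Replaces the visited-set cycle detection with a pigeonhole jump counter: more than len(A) in-bounds jumps implies a repeated position, so the hash set disappears and the loop keeps only (pos, count).
import Mathlib
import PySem

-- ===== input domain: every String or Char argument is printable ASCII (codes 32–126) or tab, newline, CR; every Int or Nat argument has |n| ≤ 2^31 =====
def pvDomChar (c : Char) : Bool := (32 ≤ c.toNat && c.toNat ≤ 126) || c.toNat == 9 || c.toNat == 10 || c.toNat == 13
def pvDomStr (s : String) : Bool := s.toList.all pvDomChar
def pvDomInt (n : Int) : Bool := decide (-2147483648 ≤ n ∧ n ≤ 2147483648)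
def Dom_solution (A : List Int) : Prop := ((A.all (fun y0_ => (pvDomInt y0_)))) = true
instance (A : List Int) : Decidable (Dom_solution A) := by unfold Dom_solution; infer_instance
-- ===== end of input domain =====

-- B replaces A's visited-dict cycle detection by a pigeonhole jump counter (count > len(A) ⇒ -1);
-- neither version mutates its argument.

-- ===== PORT A =====
-- A's while loop, one recursive call per iteration; the fuel A.length + 2 only makes the
-- recursion total: the lemmas below show the loop always returns within A.length + 1
-- iterations (the visited dict gains a fresh key each pass), so the fuel-out value is never reached.
def solutionLoop (A : List Int) (fuel : Nat) (next count : Int)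
    (visited : PySem.Dict Int Bool) : Int :=
  match fuel with
  | 0 => 0
  | fuel + 1 =>
    if next < (A.length : Int) ∧ 0 ≤ next then
      -- next += A[next] (index always in range here, so pyGet? is some)
      if (PySem.Dict.get? visited (next + (PySem.List.pyGet? A next).getD 0)).isSome then -1
      else solutionLoop A fuel (next + (PySem.List.pyGet? A next).getD 0) (count + 1)
        (PySem.Dict.insert visited (next + (PySem.List.pyGet? A next).getD 0) true)
    else count

def solution (A : List Int) : Int :=
  solutionLoop A (A.length + 2) 0 0 PySem.Dict.empty

-- ===== PORT B =====
def solutionAltLoop (A : List Int) (pos count : Int) : Int :=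
  if 0 ≤ pos ∧ pos < (A.length : Int) then
    if count + 1 > (A.length : Int) then -1
    else solutionAltLoop A (pos + (PySem.List.pyGet? A pos).getD 0) (count + 1)
  else count
termination_by ((A.length : Int) - count).toNat
decreasing_by simp only [not_lt] at *; omega

def solution_alt (A : List Int) : Int := solutionAltLoop A 0 0

-- ===== PRECONDITION & SPEC =====
def Spec_solution (A : List Int) (out : Int) : Prop := out = solution_alt A
instance (A : List Int) (out : Int) : Decidable (Spec_solution A out) := by unfold Spec_solution; infer_instance

-- ===== CLAIM (what is proved, stated in full; the proofs are below) =====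
def Claim_equal_solution : Prop := ∀ (A : List Int), Dom_solution A → Spec_solution A (solution A)

-- ===== LEMMAS AND PROOFS =====

-- the jump trajectory: traj A k = position after k jumps (frozen once out of bounds)
def traj (A : List Int) : Nat → Int
  | 0 => 0
  | k+1 =>
      let p := traj A k
      if 0 ≤ p ∧ p < (A.length : Int) then p + (PySem.List.pyGet? A p).getD 0 else p

abbrev inbounds (A : List Int) (p : Int) : Prop := 0 ≤ p ∧ p < (A.length : Int)

theorem traj_succ_of_inb {A : List Int} {c : Nat} (h : inbounds A (traj A c)) :
    traj A (c+1) = traj A c + (PySem.List.pyGet? A (traj A c)).getD 0 := by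
  simp only [traj, inbounds] at *
  rw [if_pos h]

theorem traj_shift (A : List Int) (i j : Nat) (h : traj A i = traj A j) :
    ∀ t, traj A (i+t) = traj A (j+t) := by
  intro t
  induction t with
  | zero => simpa using h
  | succ t ih =>
    have h1 : i + (t+1) = (i+t) + 1 := by omega
    have h2 : j + (t+1) = (j+t) + 1 := by omega
    rw [h1, h2, traj, traj]
    simp only [ih]

-- if the trajectory first leaves the bounds at step K, the first K+1 positions are distinct
theorem exit_distinct {A : List Int} {K : Nat}
    (hmin : ∀ m, m < K → inbounds A (traj A m)) (hK : ¬ inbounds A (traj A K)) :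
    ∀ i j, i < j → j ≤ K → traj A i ≠ traj A j := by
  intro i j hij hjK heq
  have hs := traj_shift A i j heq (K - j)
  have hjK' : j + (K - j) = K := by omega
  rw [hjK'] at hs
  exact hK (hs ▸ hmin (i + (K - j)) (by omega))

-- pigeonhole: A.length + 1 in-bounds positions among A.length cannot be distinct
theorem traj_repeat {A : List Int}
    (hall : ∀ m, m ≤ A.length → inbounds A (traj A m)) :
    ∃ i j, i < j ∧ j ≤ A.length ∧ traj A i = traj A j := by
  by_contra hno
  push Not at hno
  have hinj : Set.InjOn (traj A) (Finset.range (A.length + 1)) := by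
    intro a ha b hb hab
    simp only [Finset.coe_range, Set.mem_Iio] at ha hb
    rcases lt_trichotomy a b with h | h | h
    · exact absurd hab (hno a b h (by omega))
    · exact h
    · exact absurd hab.symm (hno b a h (by omega))
  have hmaps : ∀ a ∈ Finset.range (A.length + 1),
      traj A a ∈ Finset.Ico (0 : Int) (A.length : Int) := by
    intro a ha
    simp only [Finset.mem_range] at ha
    have := hall a (by omega)
    simp [Finset.mem_Ico, this.1, this.2]
  have hcard := Finset.card_le_card_of_injOn (traj A) hmaps hinj
  simp [Int.card_Ico] at hcard

-- some step d ≤ A.length + 1 is "detected": its new position repeats an already-visited one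
theorem detect_exists {A : List Int}
    (hall : ∀ m, m ≤ A.length → inbounds A (traj A m)) :
    ∃ d, (∃ i, i < d ∧ 1 ≤ i ∧ traj A i = traj A d) ∧ d ≤ A.length + 1 := by
  obtain ⟨i, j, hij, hjn, heq⟩ := traj_repeat hall
  rcases Nat.eq_zero_or_pos i with hi0 | hi1
  · subst hi0
    refine ⟨j + 1, ⟨1, by omega, le_refl 1, ?_⟩, by omega⟩
    have := traj_shift A 0 j heq 1
    simpa using this
  · exact ⟨j, ⟨i, hij, hi1, heq⟩, by omega⟩

-- ===== characterisation of B's loop =====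

theorem altLoop_exit {A : List Int} {K : Nat} (hKn : K ≤ A.length)
    (hmin : ∀ m, m < K → inbounds A (traj A m)) (hK : ¬ inbounds A (traj A K)) :
    ∀ d c, c + d = K → solutionAltLoop A (traj A c) (c : Int) = (K : Int) := by
  intro d
  induction d with
  | zero =>
    intro c hc
    have hc' : c = K := by omega
    subst hc'
    have hK' : ¬ (0 ≤ traj A c ∧ traj A c < (A.length : Int)) := hK
    rw [solutionAltLoop, if_neg hK']
  | succ d ih =>
    intro c hc
    have hin : inbounds A (traj A c) := hmin c (by omega)
    have hin' : 0 ≤ traj A c ∧ traj A c < (A.length : Int) := hin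
    rw [solutionAltLoop, if_pos hin', if_neg (by omega), ← traj_succ_of_inb hin]
    have := ih (c + 1) (by omega)
    push_cast at this ⊢
    exact this

theorem altLoop_cycle {A : List Int}
    (hall : ∀ m, m ≤ A.length → inbounds A (traj A m)) :
    ∀ d c, c + d = A.length → solutionAltLoop A (traj A c) (c : Int) = -1 := by
  intro d
  induction d with
  | zero =>
    intro c hc
    have hin' : 0 ≤ traj A c ∧ traj A c < (A.length : Int) := hall c (by omega)
    rw [solutionAltLoop, if_pos hin', if_pos (by omega)]
  | succ d ih =>
    intro c hc
    have hin : inbounds A (traj A c) := hall c (by omega)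
    have hin' : 0 ≤ traj A c ∧ traj A c < (A.length : Int) := hin
    rw [solutionAltLoop, if_pos hin', if_neg (by omega), ← traj_succ_of_inb hin]
    have := ih (c + 1) (by omega)
    push_cast at this ⊢
    exact this

-- ===== characterisation of A's loop =====
-- invariant on the visited dict: its keys are exactly traj 1 .. traj c

def VisInv (A : List Int) (c : Nat) (visited : PySem.Dict Int Bool) : Prop :=
  ∀ x : Int, (PySem.Dict.get? visited x).isSome = true ↔ ∃ i, 1 ≤ i ∧ i ≤ c ∧ traj A i = x

theorem visInv_empty (A : List Int) : VisInv A 0 PySem.Dict.empty := by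
  intro x
  constructor
  · intro h; simp [PySem.Dict.get?_empty] at h
  · rintro ⟨i, h1, h2, _⟩; omega

theorem visInv_insert {A : List Int} {c : Nat} {visited : PySem.Dict Int Bool}
    (hv : VisInv A c visited) :
    VisInv A (c + 1) (PySem.Dict.insert visited (traj A (c+1)) true) := by
  intro x
  rw [PySem.Dict.get?_insert]
  by_cases hx : x = traj A (c+1)
  · simp only [hx, if_pos]
    exact ⟨fun _ => ⟨c+1, by omega, le_refl _, rfl⟩, fun _ => rfl⟩
  · rw [if_neg hx, hv x]
    constructor
    · rintro ⟨i, h1, h2, h3⟩; exact ⟨i, h1, by omega, h3⟩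
    · rintro ⟨i, h1, h2, h3⟩
      refine ⟨i, h1, ?_, h3⟩
      rcases Nat.lt_or_ge i (c+1) with h | h
      · omega
      · exact absurd (by omega : i = c + 1) (fun he => hx (he ▸ h3).symm)

theorem loop_exit {A : List Int} {K : Nat} (hKn : K ≤ A.length)
    (hmin : ∀ m, m < K → inbounds A (traj A m)) (hK : ¬ inbounds A (traj A K)) :
    ∀ fuel c visited, c ≤ K → K + 1 ≤ fuel + c → VisInv A c visited →
      solutionLoop A fuel (traj A c) (c : Int) visited = (K : Int) := by
  intro fuel
  induction fuel with
  | zero => intro c _ hc hfuel _; omega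
  | succ fuel ih =>
    intro c visited hc hfuel hv
    rcases Nat.eq_or_lt_of_le hc with hcK | hcK
    · subst hcK
      rw [solutionLoop, if_neg (fun h => hK ⟨h.2, h.1⟩)]
    · have hin : inbounds A (traj A c) := hmin c hcK
      rw [solutionLoop, if_pos ⟨hin.2, hin.1⟩, ← traj_succ_of_inb hin]
      have hmem : ¬ ((PySem.Dict.get? visited (traj A (c+1))).isSome = true) := by
        rw [hv]
        rintro ⟨i, h1, h2, h3⟩
        exact exit_distinct hmin hK i (c+1) (by omega) (by omega) h3
      rw [if_neg hmem]
      have := ih (c + 1) _ (by omega) (by omega) (visInv_insert hv)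
      push_cast at this ⊢
      exact this

theorem loop_cycle {A : List Int} {D : Nat}
    (hall : ∀ m, m ≤ A.length → inbounds A (traj A m))
    (hD : ∃ i, i < D ∧ 1 ≤ i ∧ traj A i = traj A D)
    (hDmin : ∀ d, d < D → ¬ ∃ i, i < d ∧ 1 ≤ i ∧ traj A i = traj A d)
    (hDn : D ≤ A.length + 1) :
    ∀ fuel c visited, c < D → D ≤ fuel + c → VisInv A c visited →
      solutionLoop A fuel (traj A c) (c : Int) visited = -1 := by
  intro fuel
  induction fuel with
  | zero => intro c _ hc hfuel _; omega
  | succ fuel ih =>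
    intro c visited hc hfuel hv
    have hin : inbounds A (traj A c) := hall c (by omega)
    rw [solutionLoop, if_pos ⟨hin.2, hin.1⟩, ← traj_succ_of_inb hin]
    have hmemiff : (PySem.Dict.get? visited (traj A (c+1))).isSome = true ↔
        ∃ i, i < c + 1 ∧ 1 ≤ i ∧ traj A i = traj A (c+1) := by
      rw [hv]
      constructor
      · rintro ⟨i, h1, h2, h3⟩; exact ⟨i, by omega, h1, h3⟩
      · rintro ⟨i, h1, h2, h3⟩; exact ⟨i, h2, by omega, h3⟩
    rcases Nat.eq_or_lt_of_le (by omega : c + 1 ≤ D) with hcD | hcD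
    · rw [if_pos (hmemiff.mpr (hcD ▸ hD))]
    · rw [if_neg (fun h => hDmin (c+1) hcD (hmemiff.mp h))]
      have := ih (c + 1) _ hcD (by omega) (visInv_insert hv)
      push_cast at this ⊢
      exact this

-- ===== VERDICT (by name: the statement is the Claim_ definition above) =====
theorem solution_spec : Claim_equal_solution := by
  intro A _
  unfold Spec_solution solution solution_alt
  by_cases hall : ∀ m, m ≤ A.length → inbounds A (traj A m)
  · -- the trajectory never exits: both return -1
    obtain ⟨D0, hD0, hD0n⟩ := detect_exists hall
    have hex : ∃ d, ∃ i, i < d ∧ 1 ≤ i ∧ traj A i = traj A d := ⟨D0, hD0⟩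
    have hD := Nat.find_spec hex
    have hDpos : 0 < Nat.find hex := by obtain ⟨i, h1, h2, _⟩ := hD; omega
    have hDn : Nat.find hex ≤ A.length + 1 := le_trans (Nat.find_min' hex hD0) hD0n
    have hA := loop_cycle hall hD (fun d hd => Nat.find_min hex hd)
      hDn (A.length + 2) 0 PySem.Dict.empty
      hDpos (by omega) (visInv_empty A)
    have hB := altLoop_cycle hall A.length 0 (by omega)
    rw [show traj A 0 = (0:Int) from rfl] at hA hB
    simp only [Nat.cast_zero] at hA hB
    rw [hA, hB]
  · -- the trajectory exits: both return the number of jumps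
    push Not at hall
    obtain ⟨m, hmn, hm⟩ := hall
    have hex : ∃ k, ¬ inbounds A (traj A k) := ⟨m, hm⟩
    have hK : ¬ inbounds A (traj A (Nat.find hex)) := Nat.find_spec hex
    have hmin : ∀ m', m' < Nat.find hex → inbounds A (traj A m') := by
      intro m' hm'
      by_contra hcon
      exact absurd (Nat.find_min hex hm') (by simp [hcon])
    have hKn : Nat.find hex ≤ A.length := le_trans (Nat.find_min' hex hm) hmn
    have hA := loop_exit hKn hmin hK (A.length + 2) 0 PySem.Dict.empty (by omega) (by omega)
      (visInv_empty A)
    have hB := altLoop_exit hKn hmin hK (Nat.find hex) 0 (by omega)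
    rw [show traj A 0 = (0:Int) from rfl] at hA hB
    simp only [Nat.cast_zero] at hA hB
    rw [hA, hB]
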